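-- pv_equiv track=rewrite | github.com/FlorianFL/enterprise | project/ai_scripts/learning_engine.py | _categorize_lesson
-- ===== SOURCE A (Python) =====
-- def _categorize_lesson(title: str) -> str:
--     """Kategorisiert eine Lesson basierend auf dem Titel"""
--     title_lower = title.lower()
--
--     if any(word in title_lower for word in ['fehler', 'error', 'problem', 'issue']):
--         return 'error_handling'
--     elif any(word in title_lower for word in ['optimierung', 'optimization', 'performance']):
--         return 'optimization'
--     elif any(word in title_lower for word in ['kommunikation', 'communication', 'team']):
--         return 'communication'
--     elif any(word in title_lower for word in ['prozess', 'process', 'workflow']):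
--         return 'process'
--     else:
--         return 'general'
-- ===== SOURCE B (Python) =====
-- # B: flat keyword->priority table; take the MINIMUM priority among all matching
-- # keywords (no short-circuit chain), then index a name table; 4 = no match.
-- KEYWORD_PRIORITY = [
--     ('fehler', 0), ('error', 0), ('problem', 0), ('issue', 0),
--     ('optimierung', 1), ('optimization', 1), ('performance', 1),
--     ('kommunikation', 2), ('communication', 2), ('team', 2),
--     ('prozess', 3), ('process', 3), ('workflow', 3),
-- ]
-- NAMES = ['error_handling', 'optimization', 'communication', 'process', 'general']
--
-- def _categorize_lesson(title: str) -> str: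
--     title_lower = title.lower()
--     best = min((p for kw, p in KEYWORD_PRIORITY if kw in title_lower), default=4)
--     return NAMES[best]
-- ===== Notes on version B (the rewrite author's own statement) =====
-- stated objective: alternative
-- what changed: Instead of an ordered if/elif chain that short-circuits on the first matching keyword group, B scans one flat keyword->priority table, takes the minimum priority among ALL matching keywords, and maps it through a name table (priority order is encoded as numeric rank, not control flow).
import Mathlib
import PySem

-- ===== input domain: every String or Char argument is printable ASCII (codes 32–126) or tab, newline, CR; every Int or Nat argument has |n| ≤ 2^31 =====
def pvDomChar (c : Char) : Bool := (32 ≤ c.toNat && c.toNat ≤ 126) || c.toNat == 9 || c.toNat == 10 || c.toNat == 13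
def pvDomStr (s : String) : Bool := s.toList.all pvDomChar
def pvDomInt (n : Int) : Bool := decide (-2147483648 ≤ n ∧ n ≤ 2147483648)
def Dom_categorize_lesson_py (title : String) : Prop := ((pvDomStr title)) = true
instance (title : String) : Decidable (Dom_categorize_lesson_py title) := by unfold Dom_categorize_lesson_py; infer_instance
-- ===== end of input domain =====

-- B replaces A's ordered if/elif chain by a flat keyword→priority table whose minimum
-- matching priority indexes a name table (alternative algorithm, same cost).


-- ===== PORT A =====
-- literal port of A: lowercase once, then the if/elif chain over four keyword lists
def categorize_lesson_py (title : String) : String :=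
  let title_lower := PySem.Str.lower title
  if ["fehler", "error", "problem", "issue"].any (fun word => PySem.Str.isIn word title_lower) then
    "error_handling"
  else if ["optimierung", "optimization", "performance"].any (fun word => PySem.Str.isIn word title_lower) then
    "optimization"
  else if ["kommunikation", "communication", "team"].any (fun word => PySem.Str.isIn word title_lower) then
    "communication"
  else if ["prozess", "process", "workflow"].any (fun word => PySem.Str.isIn word title_lower) then
    "process"
  else
    "general"

-- ===== PORT B =====
-- B: minimum priority among all matching keywords of a flat table, then a name-table lookup
def pvKEYWORD_PRIORITY : List (String × Nat) :=
  [("fehler", 0), ("error", 0), ("problem", 0), ("issue", 0),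
   ("optimierung", 1), ("optimization", 1), ("performance", 1),
   ("kommunikation", 2), ("communication", 2), ("team", 2),
   ("prozess", 3), ("process", 3), ("workflow", 3)]

def pvNAMES : List String :=
  ["error_handling", "optimization", "communication", "process", "general"]

def categorize_lesson_py_alt (title : String) : String :=
  let title_lower := PySem.Str.lower title
  -- min((p for kw, p in KEYWORD_PRIORITY if kw in title_lower), default=4) as a min-fold
  let best := pvKEYWORD_PRIORITY.foldl
    (fun best kp => if PySem.Str.isIn kp.1 title_lower then min best kp.2 else best) 4
  pvNAMES.getD best ""                  -- NAMES[best]; best ≤ 4 so always in range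

-- ===== PRECONDITION & SPEC =====
def Spec_categorize_lesson_py (title : String) (out : String) : Prop := out = categorize_lesson_py_alt title
instance (title : String) (out : String) : Decidable (Spec_categorize_lesson_py title out) := by unfold Spec_categorize_lesson_py; infer_instance

-- ===== CLAIM (what is proved, stated in full; the proofs are below) =====
def Claim_equal_categorize_lesson_py : Prop := ∀ (title : String), Dom_categorize_lesson_py title → Spec_categorize_lesson_py title (categorize_lesson_py title)

-- ===== LEMMAS AND PROOFS =====

-- the if/elif chain and the min-fold, abstracted over the 13 keyword-match booleans
def pvChainOf (b1 b2 b3 b4 b5 b6 b7 b8 b9 b10 b11 b12 b13 : Bool) : String :=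
  if (b1 || (b2 || (b3 || (b4 || false)))) = true then "error_handling"
  else if (b5 || (b6 || (b7 || false))) = true then "optimization"
  else if (b8 || (b9 || (b10 || false))) = true then "communication"
  else if (b11 || (b12 || (b13 || false))) = true then "process"
  else "general"

def pvBestOf (b1 b2 b3 b4 b5 b6 b7 b8 b9 b10 b11 b12 b13 : Bool) : Nat :=
  let s1 := if b1 then min 4 0 else 4
  let s2 := if b2 then min s1 0 else s1
  let s3 := if b3 then min s2 0 else s2
  let s4 := if b4 then min s3 0 else s3
  let s5 := if b5 then min s4 1 else s4
  let s6 := if b6 then min s5 1 else s5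
  let s7 := if b7 then min s6 1 else s6
  let s8 := if b8 then min s7 2 else s7
  let s9 := if b9 then min s8 2 else s8
  let s10 := if b10 then min s9 2 else s9
  let s11 := if b11 then min s10 3 else s10
  let s12 := if b12 then min s11 3 else s11
  if b13 then min s12 3 else s12

theorem pvKey : ∀ (b1 b2 b3 b4 b5 b6 b7 b8 b9 b10 b11 b12 b13 : Bool),
    pvChainOf b1 b2 b3 b4 b5 b6 b7 b8 b9 b10 b11 b12 b13 =
      pvNAMES.getD (pvBestOf b1 b2 b3 b4 b5 b6 b7 b8 b9 b10 b11 b12 b13) "" := by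
  decide

-- ===== VERDICT (by name: the statement is the Claim_ definition above) =====
theorem categorize_lesson_py_spec : Claim_equal_categorize_lesson_py := by
  intro title _
  exact pvKey
    (PySem.Str.isIn "fehler" (PySem.Str.lower title))
    (PySem.Str.isIn "error" (PySem.Str.lower title))
    (PySem.Str.isIn "problem" (PySem.Str.lower title))
    (PySem.Str.isIn "issue" (PySem.Str.lower title))
    (PySem.Str.isIn "optimierung" (PySem.Str.lower title))
    (PySem.Str.isIn "optimization" (PySem.Str.lower title))
    (PySem.Str.isIn "performance" (PySem.Str.lower title))
    (PySem.Str.isIn "kommunikation" (PySem.Str.lower title))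
    (PySem.Str.isIn "communication" (PySem.Str.lower title))
    (PySem.Str.isIn "team" (PySem.Str.lower title))
    (PySem.Str.isIn "prozess" (PySem.Str.lower title))
    (PySem.Str.isIn "process" (PySem.Str.lower title))
    (PySem.Str.isIn "workflow" (PySem.Str.lower title))
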